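-- pv_equiv track=rewrite | github.com/In-Network-Machine-Learning/Planter | src/functions/logic_gates.py | XNOR_with_bits
-- ===== SOURCE A (Python) =====
-- def swap(a, b):
--     temp = a
--     a = b
--     b = temp
--
-- def XNOR_with_bits(a, b, num_bits):
--     # Make sure a is larger
--     if (a < b):
--         swap(a, b)
--     # counter for count bit and
--     #  set bit in xnor num
--     count = 0
--     # for make new xnor number
--     xnornum = 0
--     # for set bits in new xnor
--     # number
--     for _ in range(num_bits):
--         # get last bit of a
--         a_rem = a & 1
--         # get last bit of b
--         b_rem = b & 1
--         # Check if current two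
--         # bits are same
--         if (a_rem == b_rem):
--             xnornum |= (1 << count)
--         # counter for count bit
--         count = count + 1
--         a = a >> 1
--         b = b >> 1
--     return xnornum
-- ===== SOURCE B (Python) =====
-- def XNOR_with_bits(a, b, num_bits):
--     # XNOR of the low num_bits bits in one masked bitwise expression.
--     return ~(a ^ b) & ((1 << num_bits) - 1)
-- ===== Notes on version B (the rewrite author's own statement) =====
-- stated objective: faster
-- what changed: replaces the per-bit loop (extract last bits, compare, set bit, shift) by the single masked bitwise expression ~(a^b) & ((1<<num_bits)-1); intended as faster, measured 678x at n=65536 (at n=262144 A timed out and the harness could not decode B's huge output, so a timing run did not confirm the largest size).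
-- outside the precondition, e.g. on XNOR_with_bits(2, 3, -1): A returns 0, B raises ValueError
import Mathlib
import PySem

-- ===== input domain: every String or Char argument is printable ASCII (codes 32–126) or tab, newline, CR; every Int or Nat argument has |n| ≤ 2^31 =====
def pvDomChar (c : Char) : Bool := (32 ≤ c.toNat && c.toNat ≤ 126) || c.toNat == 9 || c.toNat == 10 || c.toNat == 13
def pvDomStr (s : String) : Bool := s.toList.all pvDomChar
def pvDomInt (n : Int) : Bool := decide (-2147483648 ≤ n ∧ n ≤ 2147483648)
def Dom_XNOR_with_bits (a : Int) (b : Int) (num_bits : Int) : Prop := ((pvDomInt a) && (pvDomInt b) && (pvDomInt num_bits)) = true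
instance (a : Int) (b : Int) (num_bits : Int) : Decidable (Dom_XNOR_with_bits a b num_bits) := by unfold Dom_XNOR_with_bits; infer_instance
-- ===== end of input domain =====

-- B replaces A's per-bit loop by the single masked bitwise expression ~(a^b) & ((1<<num_bits)-1).

-- ===== PORT A =====
-- Python's `swap` rebinds only its local parameters and returns None: it has no observable effect.
def swap (_a _b : Int) : Unit := ()

def XNOR_with_bits (a : Int) (b : Int) (num_bits : Int) : Int :=
  let _ : Unit := if a < b then swap a b else ()
  -- count, xnornum, a, b threaded through the `for _ in range(num_bits)` loop
  let st : Int × Int × Int × Int :=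
    (PySem.List.pyRange 0 num_bits 1).foldl (fun st _ =>
      let count := st.1
      let xnornum := st.2.1
      let a := st.2.2.1
      let b := st.2.2.2
      let a_rem := PySem.Int.band a 1
      let b_rem := PySem.Int.band b 1
      let xnornum := if a_rem = b_rem then PySem.Int.bor xnornum (1 <<< count.toNat) else xnornum
      (count + 1, xnornum, a >>> (1 : Nat), b >>> (1 : Nat)))
      (0, 0, a, b)
  st.2.1

-- ===== PORT B =====
def XNOR_with_bits_alt (a : Int) (b : Int) (num_bits : Int) : Int :=
  PySem.Int.band (Int.not (PySem.Int.bxor a b)) ((1 <<< num_bits.toNat) - 1)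

-- ===== PRECONDITION & SPEC =====
-- Pre_ excludes negative num_bits: there A's `range` loop is empty and A returns 0,
-- while B's `1 << num_bits` naturally raises ValueError (negative shift count).
def Pre_XNOR_with_bits (a : Int) (b : Int) (num_bits : Int) : Prop := 0 ≤ num_bits
instance (a : Int) (b : Int) (num_bits : Int) : Decidable (Pre_XNOR_with_bits a b num_bits) := by unfold Pre_XNOR_with_bits; infer_instance
def pvWitness_XNOR_with_bits : Int × Int × Int := (6, 3, 4)

def Spec_XNOR_with_bits (a : Int) (b : Int) (num_bits : Int) (out : Int) : Prop := out = XNOR_with_bits_alt a b num_bits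
instance (a : Int) (b : Int) (num_bits : Int) (out : Int) : Decidable (Spec_XNOR_with_bits a b num_bits out) := by unfold Spec_XNOR_with_bits; infer_instance

-- ===== CLAIM (what is proved, stated in full; the proofs are below) =====
def Claim_equal_XNOR_with_bits : Prop := ∀ (a : Int) (b : Int) (num_bits : Int), Dom_XNOR_with_bits a b num_bits → Pre_XNOR_with_bits a b num_bits → Spec_XNOR_with_bits a b num_bits (XNOR_with_bits a b num_bits)

-- ===== LEMMAS AND PROOFS =====

-- The loop body of port A as a step function on the state (count, xnornum, a, b).
def xnorStep (st : Int × Int × Int × Int) : Int × Int × Int × Int :=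
  let count := st.1
  let xnornum := st.2.1
  let a := st.2.2.1
  let b := st.2.2.2
  let a_rem := PySem.Int.band a 1
  let b_rem := PySem.Int.band b 1
  let xnornum := if a_rem = b_rem then PySem.Int.bor xnornum (1 <<< count.toNat) else xnornum
  (count + 1, xnornum, a >>> (1 : Nat), b >>> (1 : Nat))

-- mathematical XNOR of all bits (infinite two's complement)
def xnorAll (a b : Int) : Int := Int.not (PySem.Int.bxor a b)

lemma not_eq_neg_sub_one (x : Int) : Int.not x = -x - 1 := by
  cases x <;> simp [Int.not, Int.negSucc_eq] <;> omega

lemma shiftRight_one_eq (x : Int) : x >>> (1 : Nat) = x / 2 := by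
  simpa using Int.shiftRight_eq_div_pow x 1

lemma one_shiftLeft_nat (k : Nat) : ((1 <<< k : Nat) : Int) = 2 ^ k := by
  rw [Nat.one_shiftLeft]; push_cast; ring

-- Python % 2 (PySem.Int.mod = fmod) agrees with Lean's emod for the positive modulus 2.
lemma mod_two_eq_emod (x : Int) : PySem.Int.mod x 2 = x % 2 := by
  show x.fmod 2 = x % 2
  rw [Int.fmod_eq_emod]
  simp

-- Nat: setting a fresh high bit is addition.
lemma nat_or_two_pow {m k : Nat} (h : m < 2 ^ k) : m ||| 2 ^ k = m + 2 ^ k := by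
  have hmod : (m ||| 2 ^ k) % 2 ^ k = m := by
    have : ∀ i, ((m ||| 2 ^ k) % 2 ^ k).testBit i = m.testBit i := by
      intro i
      rw [Nat.testBit_mod_two_pow, Nat.testBit_or, Nat.testBit_two_pow]
      by_cases hik : i < k
      · simp [hik, Nat.ne_of_gt hik]
      · have : m.testBit i = false :=
          Nat.testBit_eq_false_of_lt (lt_of_lt_of_le h (Nat.pow_le_pow_right (by norm_num) (by omega)))
        simp [hik, this]
    exact Nat.eq_of_testBit_eq this
  have hdiv : (m ||| 2 ^ k) / 2 ^ k = 1 := by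
    apply Nat.div_eq_of_lt_le
    · simpa using Nat.right_le_or (n := m) (m := 2 ^ k)
    · have h1 : m < 2 ^ (k+1) := lt_of_lt_of_le h (Nat.pow_le_pow_right (by norm_num) (by omega))
      have h2 : 2 ^ k < 2 ^ (k+1) := Nat.pow_lt_pow_right (by norm_num) (by omega)
      calc m ||| 2^k < 2^(k+1) := Nat.or_lt_two_pow h1 h2
        _ = (1+1) * 2^k := by ring
  have hdm := Nat.div_add_mod (m ||| 2 ^ k) (2 ^ k)
  rw [hdiv, hmod] at hdm
  omega

-- Int: bor of the accumulated low bits with the fresh bit 2^k is addition.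
lemma bor_fresh_bit (x : Int) (k : Nat) (h0 : 0 ≤ x) (h1 : x < 2 ^ k) :
    PySem.Int.bor x (2 ^ k) = x + 2 ^ k := by
  have h2 : (0:Int) ≤ 2 ^ k := by positivity
  rw [PySem.Int.bor_of_nonneg h0 h2]
  have ht : ((2:Int) ^ k).toNat = 2 ^ k := by
    rw [show ((2:Int)^k) = ((2^k : Nat) : Int) by push_cast; ring, Int.toNat_natCast]
  have hxn : x.toNat < 2 ^ k := by
    have : (x.toNat : Int) < 2 ^ k := by rwa [Int.toNat_of_nonneg h0]
    exact_mod_cast this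
  rw [ht, nat_or_two_pow hxn]
  push_cast
  rw [Int.toNat_of_nonneg h0]

-- splitting an emod by 2^(k+1) into the low part and bit k
lemma emod_two_pow_succ (x : Int) (c : Int) (hc : 0 < c) :
    x % (c * 2) = x % c + c * ((x / c) % 2) := by
  have h2c : 0 < c * 2 := by omega
  have e1 := Int.emod_add_mul_ediv x (c * 2)
  have hr0 : 0 ≤ x % (c * 2) := Int.emod_nonneg x (by omega)
  have hr1 : x % (c * 2) < c * 2 := Int.emod_lt_of_pos x h2c
  set r := x % (c * 2) with hrdef
  set Q := x / (c * 2) with hQdef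
  have hx : x = r + c * (2 * Q) := by linarith [e1]
  have hdc : x / c = r / c + 2 * Q := by
    rw [hx, Int.add_mul_ediv_left _ _ (by omega)]
  have ht0 : 0 ≤ r / c := Int.ediv_nonneg hr0 (by omega)
  have ht1 : r / c < 2 := by
    apply Int.ediv_lt_of_lt_mul hc
    omega
  have e2 := Int.emod_add_mul_ediv r c
  have hs0 : 0 ≤ r % c := Int.emod_nonneg r (by omega)
  have hs1 : r % c < c := Int.emod_lt_of_pos r hc
  have hrc : r % c = x % c := Int.emod_emod_of_dvd x ⟨2, by ring⟩
  have hmod2 : (x / c) % 2 = r / c := by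
    rw [hdc]
    omega
  rw [hmod2]
  interval_cases h : r / c <;> omega

-- parity of Python xor
lemma bxor_parity (u v : Int) : PySem.Int.bxor u v % 2 = (u + v) % 2 := by
  have key : ∀ (p q : Nat), ((p ^^^ q : Nat) : Int) % 2 = ((p:Int) + q) % 2 := by
    intro p q
    have := Nat.xor_mod_two_eq (m := p) (n := q)
    have h1 : ((p ^^^ q : Nat) : Int) % 2 = (((p ^^^ q) % 2 : Nat) : Int) := by push_cast; ring
    have h2 : ((p:Int) + q) % 2 = (((p + q) % 2 : Nat) : Int) := by push_cast; ring
    rw [h1, h2, this]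
  rcases le_or_gt 0 u with hu | hu <;> rcases le_or_gt 0 v with hv | hv
  · obtain ⟨p, rfl⟩ := Int.eq_ofNat_of_zero_le hu
    obtain ⟨q, rfl⟩ := Int.eq_ofNat_of_zero_le hv
    rw [PySem.Int.bxor, if_pos hu, if_pos hv]
    simpa using key p q
  · obtain ⟨p, rfl⟩ := Int.eq_ofNat_of_zero_le hu
    obtain ⟨q, rfl⟩ := Int.eq_negSucc_of_lt_zero hv
    rw [PySem.Int.bxor, if_pos hu, if_neg (by omega : ¬ (0:Int) ≤ Int.negSucc q)]
    have hq : (-(Int.negSucc q) - 1).toNat = q := by simp [Int.negSucc_eq]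
    rw [hq]
    simp only [Int.toNat_natCast]
    have := key p q
    have hns : Int.negSucc q = -(q:Int) - 1 := by rw [Int.negSucc_eq]; ring
    omega
  · obtain ⟨p, rfl⟩ := Int.eq_negSucc_of_lt_zero hu
    obtain ⟨q, rfl⟩ := Int.eq_ofNat_of_zero_le hv
    rw [PySem.Int.bxor, if_neg (by omega : ¬ (0:Int) ≤ Int.negSucc p), if_pos hv]
    have hp : (-(Int.negSucc p) - 1).toNat = p := by simp [Int.negSucc_eq]
    rw [hp]
    simp only [Int.toNat_natCast]
    have := key p q
    have hns : Int.negSucc p = -(p:Int) - 1 := by rw [Int.negSucc_eq]; ring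
    omega
  · obtain ⟨p, rfl⟩ := Int.eq_negSucc_of_lt_zero hu
    obtain ⟨q, rfl⟩ := Int.eq_negSucc_of_lt_zero hv
    rw [PySem.Int.bxor, if_neg (by omega : ¬ (0:Int) ≤ Int.negSucc p),
      if_neg (by omega : ¬ (0:Int) ≤ Int.negSucc q)]
    have hp : (-(Int.negSucc p) - 1).toNat = p := by simp [Int.negSucc_eq]
    have hq : (-(Int.negSucc q) - 1).toNat = q := by simp [Int.negSucc_eq]
    rw [hp, hq]
    have := key p q
    have hnsp : Int.negSucc p = -(p:Int) - 1 := by rw [Int.negSucc_eq]; ring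
    have hnsq : Int.negSucc q = -(q:Int) - 1 := by rw [Int.negSucc_eq]; ring
    omega

lemma neg_half (x : Int) : (-x - 1) / 2 = -(x / 2) - 1 := by omega

lemma nat_half_xor (p q : Nat) : (p ^^^ q) / 2 = p / 2 ^^^ q / 2 := by
  have := Nat.shiftRight_xor_distrib (i := 1) (a := p) (b := q)
  simpa [Nat.shiftRight_one] using this

lemma cast_half (p : Nat) : ((p : Int)) / 2 = ((p / 2 : Nat) : Int) := by omega

-- Python xor commutes with the floor shift
lemma bxor_shift (u v : Int) :
    PySem.Int.bxor u v / 2 = PySem.Int.bxor (u / 2) (v / 2) := by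
  rcases le_or_gt 0 u with hu | hu <;> rcases le_or_gt 0 v with hv | hv
  · obtain ⟨p, rfl⟩ := Int.eq_ofNat_of_zero_le hu
    obtain ⟨q, rfl⟩ := Int.eq_ofNat_of_zero_le hv
    rw [PySem.Int.bxor, if_pos hu, if_pos hv, PySem.Int.bxor,
      if_pos (by positivity : (0:Int) ≤ (p:Int)/2), if_pos (by positivity : (0:Int) ≤ (q:Int)/2)]
    rw [Int.toNat_natCast, Int.toNat_natCast, cast_half, cast_half, cast_half,
      Int.toNat_natCast, Int.toNat_natCast, nat_half_xor]
  · obtain ⟨p, rfl⟩ := Int.eq_ofNat_of_zero_le hu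
    obtain ⟨q, rfl⟩ := Int.eq_negSucc_of_lt_zero hv
    have hns : Int.negSucc q = -(q:Int) - 1 := by rw [Int.negSucc_eq]; ring
    have hv2 : Int.negSucc q / 2 = -((q:Int)/2) - 1 := by rw [hns, neg_half]
    rw [PySem.Int.bxor, if_pos hu, if_neg (by omega : ¬ (0:Int) ≤ Int.negSucc q),
      PySem.Int.bxor, if_pos (by positivity : (0:Int) ≤ (p:Int)/2),
      if_neg (by rw [hv2]; omega)]
    have e1 : (-(Int.negSucc q) - 1).toNat = q := by simp [Int.negSucc_eq]
    have e2 : (-(Int.negSucc q / 2) - 1).toNat = q / 2 := by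
      rw [hv2, show -(-((q:Int)/2) - 1) - 1 = (q:Int)/2 by ring, cast_half, Int.toNat_natCast]
    rw [e1, e2, Int.toNat_natCast, cast_half, Int.toNat_natCast, neg_half, cast_half,
      nat_half_xor]
  · obtain ⟨p, rfl⟩ := Int.eq_negSucc_of_lt_zero hu
    obtain ⟨q, rfl⟩ := Int.eq_ofNat_of_zero_le hv
    have hns : Int.negSucc p = -(p:Int) - 1 := by rw [Int.negSucc_eq]; ring
    have hu2 : Int.negSucc p / 2 = -((p:Int)/2) - 1 := by rw [hns, neg_half]
    rw [PySem.Int.bxor, if_neg (by omega : ¬ (0:Int) ≤ Int.negSucc p), if_pos hv,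
      PySem.Int.bxor,
      if_neg (by rw [hu2]; omega),
      if_pos (by positivity : (0:Int) ≤ (q:Int)/2)]
    have e1 : (-(Int.negSucc p) - 1).toNat = p := by simp [Int.negSucc_eq]
    have e2 : (-(Int.negSucc p / 2) - 1).toNat = p / 2 := by
      rw [hu2, show -(-((p:Int)/2) - 1) - 1 = (p:Int)/2 by ring, cast_half, Int.toNat_natCast]
    rw [e1, e2, Int.toNat_natCast, cast_half, Int.toNat_natCast, neg_half, cast_half,
      nat_half_xor]
  · obtain ⟨p, rfl⟩ := Int.eq_negSucc_of_lt_zero hu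
    obtain ⟨q, rfl⟩ := Int.eq_negSucc_of_lt_zero hv
    have hnsp : Int.negSucc p = -(p:Int) - 1 := by rw [Int.negSucc_eq]; ring
    have hnsq : Int.negSucc q = -(q:Int) - 1 := by rw [Int.negSucc_eq]; ring
    have hu2 : Int.negSucc p / 2 = -((p:Int)/2) - 1 := by rw [hnsp, neg_half]
    have hv2 : Int.negSucc q / 2 = -((q:Int)/2) - 1 := by rw [hnsq, neg_half]
    rw [PySem.Int.bxor, if_neg (by omega : ¬ (0:Int) ≤ Int.negSucc p),
      if_neg (by omega : ¬ (0:Int) ≤ Int.negSucc q),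
      PySem.Int.bxor,
      if_neg (by rw [hu2]; omega),
      if_neg (by rw [hv2]; omega)]
    have e1 : (-(Int.negSucc p) - 1).toNat = p := by simp [Int.negSucc_eq]
    have e2 : (-(Int.negSucc q) - 1).toNat = q := by simp [Int.negSucc_eq]
    have e3 : (-(Int.negSucc p / 2) - 1).toNat = p / 2 := by
      rw [hu2, show -(-((p:Int)/2) - 1) - 1 = (p:Int)/2 by ring, cast_half, Int.toNat_natCast]
    have e4 : (-(Int.negSucc q / 2) - 1).toNat = q / 2 := by
      rw [hv2, show -(-((q:Int)/2) - 1) - 1 = (q:Int)/2 by ring, cast_half, Int.toNat_natCast]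
    rw [e1, e2, e3, e4, cast_half, nat_half_xor]

-- parity of the XNOR
lemma xnorAll_emod_two (u v : Int) :
    xnorAll u v % 2 = if u % 2 = v % 2 then 1 else 0 := by
  unfold xnorAll
  rw [not_eq_neg_sub_one]
  have := bxor_parity u v
  split_ifs <;> omega

-- XNOR commutes with the floor shift
lemma xnorAll_shift (u v : Int) :
    xnorAll u v / 2 = xnorAll (u / 2) (v / 2) := by
  unfold xnorAll
  rw [not_eq_neg_sub_one, not_eq_neg_sub_one, neg_half, bxor_shift]

lemma xnorAll_shift_pow (a b : Int) (k : Nat) :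
    xnorAll a b / 2 ^ k = xnorAll (a / 2 ^ k) (b / 2 ^ k) := by
  induction k with
  | zero => simp
  | succ k ih =>
    have hsplit : ∀ x : Int, x / 2 ^ (k+1) = x / 2 ^ k / 2 := by
      intro x
      rw [Int.ediv_ediv_of_nonneg (by positivity), ← pow_succ]
    rw [hsplit, hsplit, hsplit, ih, xnorAll_shift]

-- masking with 2^k - 1 is emod
lemma band_mask (x : Int) (k : Nat) :
    PySem.Int.band x (2 ^ k - 1) = x % 2 ^ k := by
  have hc : (0:Int) < 2 ^ k := by positivity
  have hcast : ((2:Int) ^ k) = ((2 ^ k : Nat) : Int) := by push_cast; ring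
  rcases le_or_gt 0 x with hx | hx
  · obtain ⟨m, rfl⟩ := Int.eq_ofNat_of_zero_le hx
    rw [PySem.Int.band_of_nonneg (by omega) (by omega)]
    have h1 : ((m:Int)).toNat = m := Int.toNat_natCast m
    have h2 : ((2:Int) ^ k - 1).toNat = 2 ^ k - 1 := by
      rw [hcast]
      omega
    rw [h1, h2, Nat.and_two_pow_sub_one_eq_mod, hcast]
    push_cast
    rfl
  · obtain ⟨m, rfl⟩ := Int.eq_negSucc_of_lt_zero hx
    rw [PySem.Int.band]
    have hna : ¬ (0:Int) ≤ Int.negSucc m := by omega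
    have hb : (0:Int) ≤ 2 ^ k - 1 := by omega
    simp only [hna, hb, if_true, if_false]
    have h2 : ((2:Int) ^ k - 1).toNat = 2 ^ k - 1 := by rw [hcast]; omega
    have h3 : (-(Int.negSucc m) - 1).toNat = m := by
      simp [Int.negSucc_eq]
    rw [h2, h3, Nat.land_comm, Nat.and_two_pow_sub_one_eq_mod]
    have hmlt : (m : Int) % 2 ^ k = ((m % 2 ^ k : Nat) : Int) := by push_cast; ring
    have e1 := Int.emod_add_mul_ediv (m : Int) ((2:Int) ^ k)
    have b1 : 0 ≤ (m:Int) % 2 ^ k := Int.emod_nonneg _ (by omega)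
    have b2 : (m:Int) % 2 ^ k < 2 ^ k := Int.emod_lt_of_pos _ hc
    have hns : Int.negSucc m = -(m:Int) - 1 := by rw [Int.negSucc_eq]; ring
    have key : Int.negSucc m % 2 ^ k = 2 ^ k - 1 - (m:Int) % 2 ^ k := by
      have huniq := (Int.ediv_emod_unique (a := Int.negSucc m) (b := 2 ^ k)
        (q := -((m:Int) / 2 ^ k) - 1) (r := 2 ^ k - 1 - (m:Int) % 2 ^ k) hc).mpr
      refine (huniq ⟨?_, by omega, by omega⟩).2
      have : (2:Int) ^ k * (-((m:Int) / 2 ^ k) - 1) = -(2 ^ k * ((m:Int) / 2 ^ k)) - 2 ^ k := by ring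
      rw [hns]
      omega
    rw [key]
    omega

-- the fold of port A is an iterate of xnorStep
lemma foldl_eq_iterate (l : List Int) (s : Int × Int × Int × Int) :
    l.foldl (fun st (_ : Int) =>
      let count := st.1
      let xnornum := st.2.1
      let a := st.2.2.1
      let b := st.2.2.2
      let a_rem := PySem.Int.band a 1
      let b_rem := PySem.Int.band b 1
      let xnornum := if a_rem = b_rem then PySem.Int.bor xnornum (1 <<< count.toNat) else xnornum
      (count + 1, xnornum, a >>> (1 : Nat), b >>> (1 : Nat))) s
    = xnorStep^[l.length] s := by
  induction l generalizing s with
  | nil => rfl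
  | cons x xs ih => simpa [Function.iterate_succ_apply, xnorStep] using ih (xnorStep s)

-- the loop invariant of port A
lemma iterate_inv (k : Nat) (a b : Int) :
    xnorStep^[k] (0, 0, a, b)
      = ((k : Int), xnorAll a b % 2 ^ k, a / 2 ^ k, b / 2 ^ k) := by
  induction k with
  | zero => simp
  | succ k ih =>
    rw [Function.iterate_succ_apply', ih]
    show ((k:Int) + 1,
      (if PySem.Int.band (a / 2 ^ k) 1 = PySem.Int.band (b / 2 ^ k) 1
        then PySem.Int.bor (xnorAll a b % 2 ^ k) (1 <<< ((k:Int)).toNat)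
        else xnorAll a b % 2 ^ k),
      (a / 2 ^ k) >>> (1:Nat), (b / 2 ^ k) >>> (1:Nat)) = _
    have hc : (0:Int) < 2 ^ k := by positivity
    have hsplit : ∀ x : Int, x / 2 ^ (k+1) = x / 2 ^ k / 2 := by
      intro x
      rw [Int.ediv_ediv_of_nonneg (by positivity), ← pow_succ]
    have hcount : (k:Int) + 1 = ((k+1 : Nat) : Int) := by push_cast; ring
    have hcond : ∀ x : Int, PySem.Int.band x 1 = x % 2 := by
      intro x
      rw [PySem.Int.band_one, mod_two_eq_emod]
    have hbit : xnorAll a b / 2 ^ k % 2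
        = if (a / 2 ^ k) % 2 = (b / 2 ^ k) % 2 then 1 else 0 := by
      rw [xnorAll_shift_pow, xnorAll_emod_two]
    have hmodsucc : xnorAll a b % 2 ^ (k+1)
        = xnorAll a b % 2 ^ k + 2 ^ k * ((xnorAll a b / 2 ^ k) % 2) := by
      rw [show ((2:Int) ^ (k+1)) = 2 ^ k * 2 by ring]
      exact emod_two_pow_succ _ _ hc
    have hb0 : 0 ≤ xnorAll a b % 2 ^ k := Int.emod_nonneg _ (by omega)
    have hb1 : xnorAll a b % 2 ^ k < 2 ^ k := Int.emod_lt_of_pos _ hc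
    rw [hcond, hcond, shiftRight_one_eq, shiftRight_one_eq, ← hsplit, ← hsplit, hcount]
    by_cases hcd : (a / 2 ^ k) % 2 = (b / 2 ^ k) % 2
    · rw [if_pos hcd]
      rw [Int.toNat_natCast, one_shiftLeft_nat, bor_fresh_bit _ _ hb0 hb1]
      have : xnorAll a b % 2 ^ (k+1) = xnorAll a b % 2 ^ k + 2 ^ k := by
        rw [hmodsucc, hbit, if_pos hcd]
        ring
      rw [← this]
    · rw [if_neg hcd]
      have : xnorAll a b % 2 ^ (k+1) = xnorAll a b % 2 ^ k := by
        rw [hmodsucc, hbit, if_neg hcd]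
        ring
      rw [← this]

-- ===== VERDICT (by name: the statement is the Claim_ definition above) =====
theorem XNOR_with_bits_spec : Claim_equal_XNOR_with_bits := by
  intro a b num_bits _ hpre
  unfold Spec_XNOR_with_bits XNOR_with_bits XNOR_with_bits_alt
  rw [foldl_eq_iterate, PySem.List.length_pyRange_one]
  have hlen : (num_bits - 0).toNat = num_bits.toNat := by omega
  rw [hlen, iterate_inv]
  show xnorAll a b % 2 ^ num_bits.toNat = _
  rw [one_shiftLeft_nat, band_mask]
  rfl
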